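-- pv_equiv track=rewrite | github.com/s-sabirov/Tasks-on-Python | Task 2.py | count_target_words_from_string
-- ===== SOURCE A (Python) =====
-- from collections import defaultdict
--
-- def count_unic_letters(word):
--     result = defaultdict(int)
--     for letter in word:
--         result[letter] += 1
--
--     return result
--
-- def count_target_words_from_string(target_word, string):
--     result = None
--
--     unic_letters_cont_in_target = count_unic_letters(target_word)
--     unic_letters_cont_in_string = count_unic_letters(string)
--
--     for letter, count_in_target in unic_letters_cont_in_target.items():
--         letter_count_in_string = unic_letters_cont_in_string.get(letter, 0)
--         max_repeat = letter_count_in_string // count_in_target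
--
--         if result is None:
--             result = max_repeat
--         elif max_repeat < result:
--             result = max_repeat
--
--     return result
-- ===== SOURCE B (Python) =====
-- def count_target_words_from_string(target_word, string):
--     # binary search on the answer: largest k with enough of every target letter in string
--     if not target_word:
--         return None
--     lo, hi = 0, len(string)
--     while lo < hi:
--         mid = (lo + hi + 1) // 2
--         if all(string.count(c) >= mid * target_word.count(c) for c in set(target_word)):
--             lo = mid
--         else:
--             hi = mid - 1
--     return lo
-- ===== Notes on version B (the rewrite author's own statement) =====
-- stated objective: alternative
-- what changed: B replaces A's frequency-dict construction and min-over-ratios fold by a binary search on the answer k over [0, len(string)], using a feasibility test 'string contains at least k*count copies of every target letter'; it searches the answer space instead of computing per-letter quotients and taking a minimum.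
import Mathlib
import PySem

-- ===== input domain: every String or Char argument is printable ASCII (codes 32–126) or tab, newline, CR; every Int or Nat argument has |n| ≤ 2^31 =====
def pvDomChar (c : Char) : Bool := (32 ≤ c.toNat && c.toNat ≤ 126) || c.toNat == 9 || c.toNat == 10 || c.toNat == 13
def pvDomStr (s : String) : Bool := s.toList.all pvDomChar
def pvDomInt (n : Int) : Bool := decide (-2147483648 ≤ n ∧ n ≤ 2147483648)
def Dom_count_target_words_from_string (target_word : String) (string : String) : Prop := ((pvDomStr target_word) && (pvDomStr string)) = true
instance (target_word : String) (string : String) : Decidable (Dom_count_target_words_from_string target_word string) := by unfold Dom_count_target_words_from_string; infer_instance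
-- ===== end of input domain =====

-- B replaces A's min-over-letter-ratios fold by a binary search on the answer k,
-- testing feasibility "string has ≥ k copies of every target letter" (alternative algorithm).


-- ===== PORT A =====
-- defaultdict(int) counter loop: result[letter] += 1
def count_unic_letters (word : List Char) : PySem.Dict Char Int :=
  word.foldl (fun d letter => d.modify letter 0 (· + 1)) PySem.Dict.empty

def count_target_words_from_string (target_word : String) (string : String) : Option Int :=
  let unic_letters_cont_in_target := count_unic_letters target_word.toList
  let unic_letters_cont_in_string := count_unic_letters string.toList
  unic_letters_cont_in_target.items.foldl
    (fun result p =>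
      let letter_count_in_string := unic_letters_cont_in_string.getD p.1 0
      let max_repeat := PySem.Int.floordiv letter_count_in_string p.2
      match result with
      | none => some max_repeat
      | some r => if max_repeat < r then some max_repeat else some r)
    none

-- ===== PORT B =====
-- all(string.count(c) >= mid * target_word.count(c) for c in set(target_word))
def pvFeasible (t s : List Char) (mid : Int) : Bool :=
  (PySem.Set.ofList t).all (fun c => decide (mid * (t.count c : Int) ≤ (s.count c : Int)))

-- the 'while lo < hi' binary-search loop of Source B
def pvBSearch (t s : List Char) (lo hi : Int) : Int :=
  if h : lo < hi then
    let mid := PySem.Int.floordiv (lo + hi + 1) 2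
    if pvFeasible t s mid then pvBSearch t s mid hi else pvBSearch t s lo (mid - 1)
  else lo
termination_by (hi - lo).toNat
decreasing_by
  · have hb := PySem.Int.floordiv_two_mid_bounds (lo := lo + 1) (hi := hi) (by omega)
    have he : lo + hi + 1 = lo + 1 + hi := by ring
    rw [he]; omega
  · have hb := PySem.Int.floordiv_two_mid_bounds (lo := lo + 1) (hi := hi) (by omega)
    have he : lo + hi + 1 = lo + 1 + hi := by ring
    rw [he]; omega

def count_target_words_from_string_alt (target_word : String) (string : String) : Option Int :=
  if target_word.toList = [] then none
  else some (pvBSearch target_word.toList string.toList 0 (PySem.Str.len string))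

-- ===== PRECONDITION & SPEC =====
def Spec_count_target_words_from_string (target_word : String) (string : String) (out : Option Int) : Prop := out = count_target_words_from_string_alt target_word string
instance (target_word : String) (string : String) (out : Option Int) : Decidable (Spec_count_target_words_from_string target_word string out) := by unfold Spec_count_target_words_from_string; infer_instance

-- ===== CLAIM =====
def Claim_equal_count_target_words_from_string : Prop := ∀ (target_word : String) (string : String), Dom_count_target_words_from_string target_word string → Spec_count_target_words_from_string target_word string (count_target_words_from_string target_word string)

-- ===== LEMMAS AND PROOFS =====
theorem count_unic_letters_eq_counter (word : List Char) :
    count_unic_letters word = PySem.Dict.counter word := by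
  rw [PySem.Dict.counter_eq_foldl]; rfl

-- A's running-minimum step
def pvMinStep (r : Option Int) (x : Int) : Option Int :=
  match r with
  | none => some x
  | some r => if x < r then some x else some r

theorem pvMinStep_some (r x : Int) : pvMinStep (some r) x = some (min r x) := by
  rcases lt_or_ge x r with h | h
  · simp [pvMinStep, h, min_eq_right h.le]
  · simp [pvMinStep, not_lt.mpr h, min_eq_left h]

theorem foldl_minStep_some (xs : List Int) : ∀ r : Int,
    xs.foldl pvMinStep (some r) = some (xs.foldl min r) := by
  induction xs with
  | nil => intro r; rfl
  | cons y ys ih => intro r; simp [List.foldl_cons, pvMinStep_some, ih]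

theorem foldl_min_mem (x : Int) (xs : List Int) : xs.foldl min x ∈ x :: xs := by
  induction xs generalizing x with
  | nil => simp
  | cons y ys ih =>
      have h := ih (min x y)
      simp only [List.foldl_cons]
      rcases List.mem_cons.mp h with he | hm
      · rcases min_choice x y with hc | hc <;> rw [he, hc] <;> simp
      · simp only [List.mem_cons]; right; right; exact hm

theorem foldl_min_le (x : Int) (xs : List Int) : ∀ y ∈ x :: xs, xs.foldl min x ≤ y := by
  induction xs generalizing x with
  | nil => intro y hy; simp at hy; simp [hy]
  | cons z zs ih =>
      intro y hy
      simp only [List.foldl_cons]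
      have hall := ih (min x z)
      simp only [List.mem_cons] at hy
      rcases hy with h | h | h
      · exact le_trans (hall (min x z) (by simp)) (by rw [h]; exact min_le_left _ _)
      · exact le_trans (hall (min x z) (by simp)) (by rw [h]; exact min_le_right _ _)
      · exact hall y (by simp [h])

-- binary-search correctness: if feasibility is exactly "k ≤ m" then the loop returns m
theorem pvBSearch_eq (t s : List Char) (m : Int)
    (hf : ∀ k, pvFeasible t s k = true ↔ k ≤ m) :
    ∀ n lo hi, (hi - lo).toNat ≤ n → lo ≤ m → m ≤ hi → pvBSearch t s lo hi = m := by
  intro n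
  induction n with
  | zero =>
      intro lo hi hn h1 h2
      rw [pvBSearch]
      have hlt : ¬ lo < hi := by omega
      simp [hlt]; omega
  | succ n ih =>
      intro lo hi hn h1 h2
      rw [pvBSearch]
      by_cases hlt : lo < hi
      · simp only [hlt, dif_pos]
        have hb := PySem.Int.floordiv_two_mid_bounds (lo := lo + 1) (hi := hi) (by omega)
        have he : lo + hi + 1 = lo + 1 + hi := by ring
        rw [he]
        set mid := PySem.Int.floordiv (lo + 1 + hi) 2 with hm
        by_cases hfe : pvFeasible t s mid = true
        · have hle : mid ≤ m := (hf mid).mp hfe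
          simp only [hfe, if_true]
          exact ih mid hi (by omega) hle h2
        · have hgt : ¬ mid ≤ m := fun h => hfe ((hf mid).mpr h)
          simp only [hfe]
          exact ih lo (mid - 1) (by omega) h1 (by omega)
      · simp [hlt]; omega

-- ===== VERDICT =====
theorem count_target_words_from_string_spec : Claim_equal_count_target_words_from_string := by
  intro target_word string _
  unfold Spec_count_target_words_from_string count_target_words_from_string
    count_target_words_from_string_alt
  simp only [count_unic_letters_eq_counter, PySem.Dict.items_counter, List.foldl_map,
    PySem.Dict.getD_counter, PySem.Str.len_eq]
  generalize target_word.toList = t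
  generalize string.toList = s
  by_cases hte : t = []
  · simp [hte]
  · simp only [hte, if_false]
    obtain ⟨c0, cs, hcons⟩ : ∃ c0 cs, PySem.Set.ofList t = c0 :: cs := by
      cases hof : PySem.Set.ofList t with
      | nil =>
          exfalso
          cases t with
          | nil => exact hte rfl
          | cons a l =>
              have ha : a ∈ PySem.Set.ofList (a :: l) := by
                rw [PySem.Set.mem_ofList]; simp
              rw [hof] at ha; simp at ha
      | cons c0 cs => exact ⟨c0, cs, rfl⟩
    set ratio := fun c : Char => PySem.Int.floordiv ((s.count c : Int)) ((t.count c : Int)) with hr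
    have hfoldA :
        (PySem.Set.ofList t).foldl (fun r c => pvMinStep r (ratio c)) none
          = some ((cs.map ratio).foldl min (ratio c0)) := by
      rw [hcons]
      simp only [List.foldl_cons]
      rw [show pvMinStep none (ratio c0) = some (ratio c0) from rfl, ← List.foldl_map,
        foldl_minStep_some]
    set m := (cs.map ratio).foldl min (ratio c0) with hmdef
    have hmem : m ∈ ratio c0 :: cs.map ratio := foldl_min_mem _ _
    have hle : ∀ y ∈ ratio c0 :: cs.map ratio, m ≤ y := foldl_min_le _ _
    have hpos : ∀ c ∈ PySem.Set.ofList t, (0 : Int) < (t.count c : Int) := by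
      intro c hc
      rw [PySem.Set.mem_ofList] at hc
      exact_mod_cast List.count_pos_iff.mpr hc
    have hle' : ∀ c ∈ PySem.Set.ofList t, m ≤ ratio c := by
      intro c hc
      rw [hcons] at hc
      rcases List.mem_cons.mp hc with rfl | hc
      · exact hle _ (by simp)
      · exact hle _ (List.mem_cons_of_mem _ (List.mem_map_of_mem hc))
    have hmemt : ∃ c ∈ PySem.Set.ofList t, m = ratio c := by
      rcases List.mem_cons.mp hmem with h | h
      · exact ⟨c0, by rw [hcons]; simp, h⟩
      · rcases List.mem_map.mp h with ⟨c, hc, hcm⟩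
        exact ⟨c, by rw [hcons]; simp [hc], hcm.symm⟩
    have hf : ∀ k, pvFeasible t s k = true ↔ k ≤ m := by
      intro k
      unfold pvFeasible
      rw [List.all_eq_true]
      constructor
      · intro h
        rcases hmemt with ⟨c, hc, hcm⟩
        have hkc := h c hc
        simp only [decide_eq_true_eq] at hkc
        rw [hcm, hr]
        exact (PySem.Int.le_floordiv_iff_mul_le (hpos c hc)).mpr hkc
      · intro hk c hc
        simp only [decide_eq_true_eq]
        have h2 : m * (t.count c : Int) ≤ (s.count c : Int) :=
          (PySem.Int.le_floordiv_iff_mul_le (hpos c hc)).mp (hle' c hc)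
        have h3 : k * (t.count c : Int) ≤ m * (t.count c : Int) :=
          mul_le_mul_of_nonneg_right hk (le_of_lt (hpos c hc))
        exact le_trans h3 h2
    have hm0 : 0 ≤ m := by
      rcases hmemt with ⟨c, hc, hcm⟩
      rw [hcm, hr]
      exact (PySem.Int.le_floordiv_iff_mul_le (hpos c hc)).mpr (by simp)
    have hmlen : m ≤ (s.length : Int) := by
      rcases hmemt with ⟨c, hc, hcm⟩
      have hct := hpos c hc
      have hds : PySem.Int.floordiv ((s.count c : Int)) ((t.count c : Int)) ≤ (s.count c : Int) := by
        rw [PySem.Int.floordiv_eq_ediv_of_pos hct]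
        exact Int.ediv_le_self _ (by positivity)
      have hcl : (s.count c : Int) ≤ (s.length : Int) := by
        exact_mod_cast List.count_le_length
      rw [hcm]; simp only [hr]; exact le_trans hds hcl
    rw [pvBSearch_eq t s m hf ((s.length : Int) - 0).toNat 0 (s.length : Int) (by omega) hm0 hmlen]
    exact hfoldA
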